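-- pv_equiv track=rewrite | github.com/AntaoA/projet-blast | blast.py | construire_dico_mots
-- ===== SOURCE A (Python) =====
-- def construire_dico_mots(seq, w):
--     dico_mots = {}
--     nb_mots = len(seq) - w + 1
--     for i in range(nb_mots):
--         mot = seq[i:i+w]
--         if mot not in dico_mots:
--             dico_mots[mot] = []
--         dico_mots[mot].append(i)
--     return dico_mots
-- ===== SOURCE B (Python) =====
-- def construire_dico_mots(seq, w):
--     n = len(seq) - w + 1
--     mots = [seq[i:i + w] for i in range(n)]
--     return {m: [i for i, x in enumerate(mots) if x == m] for m in dict.fromkeys(mots)}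
-- ===== Notes on version B (the rewrite author's own statement) =====
-- stated objective: alternative
-- what changed: Replaces A's incremental dict-accumulation loop (membership test, lazy bucket creation, append per index) with a two-pass decomposition: materialise the list of windows once, dedup it with dict.fromkeys for the key order, and build each bucket by a gather over enumerate(mots).
import Mathlib
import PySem

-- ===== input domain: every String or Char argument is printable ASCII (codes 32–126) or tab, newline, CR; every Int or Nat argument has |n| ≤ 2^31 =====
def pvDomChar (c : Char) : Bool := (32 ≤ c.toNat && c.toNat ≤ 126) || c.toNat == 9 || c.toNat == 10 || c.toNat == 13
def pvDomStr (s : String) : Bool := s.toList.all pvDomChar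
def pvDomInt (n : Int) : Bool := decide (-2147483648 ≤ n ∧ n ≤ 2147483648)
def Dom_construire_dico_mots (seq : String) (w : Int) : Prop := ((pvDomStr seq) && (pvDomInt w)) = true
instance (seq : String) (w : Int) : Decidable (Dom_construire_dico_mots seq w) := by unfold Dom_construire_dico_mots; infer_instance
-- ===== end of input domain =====

-- B builds the window list once, dedups it for the keys and gathers each bucket from enumerate, instead of A's incremental dict accumulation; objective: alternative decomposition.

-- ===== PORT A =====
def construire_dico_mots (seq : String) (w : Int) : List (String × List Int) :=
  let nb_mots : Int := PySem.Str.len seq - w + 1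
  ((PySem.List.pyRange 0 nb_mots).foldl (fun dico i =>
      let mot := PySem.Str.slice seq (some i) (some (i + w))
      let dico := if dico.contains mot then dico else dico.insert mot []
      dico.modify mot [] (fun l => l ++ [i])) PySem.Dict.empty).items

-- ===== PORT B =====
def construire_dico_mots_alt (seq : String) (w : Int) : List (String × List Int) :=
  let n : Int := PySem.Str.len seq - w + 1
  let mots := (PySem.List.pyRange 0 n).map (fun i => PySem.Str.slice seq (some i) (some (i + w)))
  (PySem.List.dedup mots).map (fun m =>
    (m, ((PySem.List.enumerate mots).filter (fun p => p.2 == m)).map (fun p => p.1)))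

-- ===== PRECONDITION & SPEC =====
def Spec_construire_dico_mots (seq : String) (w : Int) (out : List (String × List Int)) : Prop := out = construire_dico_mots_alt seq w
instance (seq : String) (w : Int) (out : List (String × List Int)) : Decidable (Spec_construire_dico_mots seq w out) := by unfold Spec_construire_dico_mots; infer_instance

-- ===== CLAIM (what is proved, stated in full; the proofs are below) =====
def Claim_equal_construire_dico_mots : Prop := ∀ (seq : String) (w : Int), Dom_construire_dico_mots seq w → Spec_construire_dico_mots seq w (construire_dico_mots seq w)

-- ===== LEMMAS AND PROOFS =====

-- A's "ensure the key exists, then append" step is one modify.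
theorem pv_insert_absorb (d : PySem.Dict String (List Int)) (k : String) (i : Int) :
    (if d.contains k then d else d.insert k []).modify k [] (fun l => l ++ [i])
      = d.modify k [] (fun l => l ++ [i]) := by
  by_cases h : d.contains k = true
  · simp [h]
  · rw [if_neg (by simp [h]), PySem.Dict.modify, PySem.Dict.modify,
      PySem.Dict.getD_insert_self, PySem.Dict.insert_insert_self,
      PySem.Dict.getD_of_not_contains d [] (by simp [h])]

-- enumerate of a map over range(n) tags each value with its own index.
theorem pv_enumerate_map_range (n : Nat) (f : Int → String) :
    PySem.List.enumerate ((PySem.List.pyRange 0 (n : Int)).map f)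
      = (PySem.List.pyRange 0 (n : Int)).map (fun j => (j, f j)) := by
  rw [PySem.List.enumerate_eq_map_pyRange _ ""]
  have hlen : PySem.List.len ((PySem.List.pyRange 0 (n : Int)).map f) = (n : Int) := by
    simp [PySem.List.len, PySem.List.length_pyRange_one]
  rw [hlen]
  refine List.map_congr_left ?_
  intro j hj
  rcases (PySem.List.mem_pyRange_one).1 hj with ⟨h0, hn⟩
  have : j = ((j.toNat : Nat) : Int) := by omega
  rw [this, PySem.List.pyGetD_map_pyRange f n j.toNat "" (by omega)]

theorem construire_dico_mots_eq (seq : String) (w : Int) :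
    construire_dico_mots seq w = construire_dico_mots_alt seq w := by
  unfold construire_dico_mots construire_dico_mots_alt
  dsimp only
  set n : Int := PySem.Str.len seq - w + 1 with hn
  set f : Int → String := fun i => PySem.Str.slice seq (some i) (some (i + w)) with hf
  -- collapse A's step to a single modify
  have hstep : ((PySem.List.pyRange 0 n).foldl (fun dico i =>
        let mot := f i
        let dico := if dico.contains mot then dico else dico.insert mot []
        dico.modify mot [] (fun l => l ++ [i])) PySem.Dict.empty)
      = ((PySem.List.pyRange 0 n).map (fun i => (f i, i))).foldl
          (fun d p => d.modify p.1 [] (fun x => x ++ [p.2])) PySem.Dict.empty := by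
    rw [List.foldl_map]
    exact PySem.List.foldl_congr_mem _ _ _ _ (fun d i _ => pv_insert_absorb d (f i) i)
  rw [hstep]
  set pairs := (PySem.List.pyRange 0 n).map (fun i => (f i, i)) with hpairs
  set D := pairs.foldl (fun d p => d.modify p.1 [] (fun x => x ++ [p.2])) PySem.Dict.empty with hD
  have hkeys : D.keys = PySem.Set.ofList ((PySem.List.pyRange 0 n).map f) := by
    rw [hD, PySem.Dict.keys_foldl_modify_key pairs Prod.fst [] (fun _ p => fun x => x ++ [p.2])
      PySem.Dict.empty, hpairs, List.map_map]
    simp [PySem.Set.update, PySem.Set.ofList_eq_foldl, PySem.Dict.keys_empty, Function.comp_def]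
  have hnodup : D.keys.Nodup := by
    rw [hD]
    exact PySem.Dict.nodup_keys_foldl_modify_key pairs Prod.fst [] (fun _ p => fun x => x ++ [p.2])
      PySem.Dict.empty (by simp [PySem.Dict.keys_empty])
  rw [PySem.Dict.items_eq_map_keys D hnodup [], hkeys]
  have hdedup : PySem.List.dedup ((PySem.List.pyRange 0 n).map f)
      = PySem.Set.ofList ((PySem.List.pyRange 0 n).map f) := rfl
  rw [hdedup]
  refine List.map_congr_left ?_
  intro m _
  have hval : D.getD m [] = (pairs.filter (fun p => p.1 == m)).map (fun p => p.2) := by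
    rw [hD]
    have := PySem.Dict.getD_foldl_modify_append pairs PySem.Dict.empty m
    simpa [PySem.Dict.getD_empty] using this
  rw [hval, hpairs]
  -- both buckets are the filtered range itself
  by_cases hle : n ≤ 0
  · have hempty : PySem.List.pyRange 0 n = [] := by
      simp [PySem.List.pyRange_one_eq_nil (by omega : n ≤ (0:Int))]
    simp [hempty]
  · have hpos : 0 < n := by omega
    have hcast : n = ((n.toNat : Nat) : Int) := by omega
    rw [hcast, pv_enumerate_map_range n.toNat f]
    rw [List.filter_map, List.filter_map, List.map_map, List.map_map]
    rfl

-- ===== VERDICT (by name: the statement is the Claim_ definition above) =====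
theorem construire_dico_mots_spec : Claim_equal_construire_dico_mots := by
  intro seq w _
  exact construire_dico_mots_eq seq w
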